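-- pv_equiv track=rewrite | github.com/tongsh6/pi-proof-forge | tools/policy/exclusions.py | _matches_company_rules
-- ===== SOURCE A (Python) =====
-- def _matches_company_rules(company: str, exclusions: list[str]) -> bool:
--     normalized_company = _normalize_text(company)
--     if not normalized_company:
--         return False
--     for entry in exclusions:
--         match, value = _parse_rule(entry)
--         if not value:
--             continue
--         if match == "contains":
--             if value in normalized_company:
--                 return True
--         elif value == normalized_company:
--             return True
--     return False
--
-- def _parse_rule(entry: str) -> tuple[str, str]:
--     raw = entry.strip()
--     lowered = raw.lower()
--     if lowered.startswith("contains:"):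
--         return "contains", _normalize_text(raw[len("contains:") :])
--     if lowered.startswith("exact:"):
--         return "exact", _normalize_text(raw[len("exact:") :])
--     return "exact", _normalize_text(raw)
--
-- def _normalize_text(value: str) -> str:
--     return "".join(value.casefold().split())
-- ===== SOURCE B (Python) =====
-- def _matches_company_rules(company: str, exclusions: list[str]) -> bool:
--     normalized_company = _normalize_text(company)
--     if not normalized_company:
--         return False
--     # Phase 1: build an index of the rules.
--     exact_values = set()
--     contains_values = []
--     for entry in exclusions:
--         match, value = _parse_rule(entry)
--         if not value:
--             continue
--         if match == "contains":
--             contains_values.append(value)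
--         else:
--             exact_values.add(value)
--     # Phase 2: check the company against the index.
--     if normalized_company in exact_values:
--         return True
--     return any(v in normalized_company for v in contains_values)
--
-- def _parse_rule(entry: str) -> tuple[str, str]:
--     raw = entry.strip()
--     lowered = raw.lower()
--     if lowered.startswith("contains:"):
--         return "contains", _normalize_text(raw[len("contains:") :])
--     if lowered.startswith("exact:"):
--         return "exact", _normalize_text(raw[len("exact:") :])
--     return "exact", _normalize_text(raw)
--
-- def _normalize_text(value: str) -> str:
--     return "".join(value.casefold().split())
-- ===== Notes on version B (the rewrite author's own statement) =====
-- stated objective: alternative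
-- what changed: A's single interleaved scan with per-entry branching and early return is replaced by a two-phase structure: first build an index (a set of exact values and a list of contains values) over all rules, then check the company by one set-membership lookup followed by an any() substring scan.
import Mathlib
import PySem

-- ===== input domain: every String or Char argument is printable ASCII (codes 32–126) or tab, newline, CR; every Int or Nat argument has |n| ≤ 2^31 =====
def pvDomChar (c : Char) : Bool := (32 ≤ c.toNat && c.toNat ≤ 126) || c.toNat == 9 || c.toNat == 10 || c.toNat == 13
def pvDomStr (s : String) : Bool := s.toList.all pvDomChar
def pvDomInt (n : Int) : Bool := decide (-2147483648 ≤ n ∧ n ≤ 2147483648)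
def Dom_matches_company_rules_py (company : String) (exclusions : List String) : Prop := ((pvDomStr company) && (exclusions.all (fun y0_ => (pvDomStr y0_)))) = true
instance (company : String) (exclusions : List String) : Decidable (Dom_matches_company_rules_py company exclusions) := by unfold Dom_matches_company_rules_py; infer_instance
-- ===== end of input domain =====

-- B replaces A's single interleaved branch-per-entry scan by an index-build phase (exact set + contains list) followed by a set lookup and an any-scan (objective: alternative decomposition).
-- (casefold == lower on the ASCII input domain)

-- ===== PORT A =====
-- shared module helper _normalize_text: "".join(value.casefold().split())
def normText (value : String) : String :=
  PySem.Str.join "" (PySem.Str.split₀ (PySem.Str.lower value))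

-- shared module helper _parse_rule
def parseRule (entry : String) : String × String :=
  let raw := PySem.Str.strip entry
  let lowered := PySem.Str.lower raw
  if PySem.Str.startswith lowered "contains:" then
    ("contains", normText (PySem.Str.slice raw (some 9) none))
  else if PySem.Str.startswith lowered "exact:" then
    ("exact", normText (PySem.Str.slice raw (some 6) none))
  else
    ("exact", normText raw)

-- A's for-loop with early return, as structural recursion over the exclusions
def loopA (nc : String) : List String → Bool
  | [] => false
  | entry :: rest =>
    let mv := parseRule entry
    if mv.2 == "" then loopA nc rest
    else if mv.1 == "contains" then
      if PySem.Str.isIn mv.2 nc then true else loopA nc rest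
    else if mv.2 == nc then true
    else loopA nc rest

def matches_company_rules_py (company : String) (exclusions : List String) : Bool :=
  let nc := normText company
  if nc == "" then false else loopA nc exclusions

-- ===== PORT B =====
-- phase 1 of B: fold the exclusions into (exact-value set, contains-value list)
def buildIndex (exclusions : List String) : PySem.Set String × List String :=
  exclusions.foldl
    (fun acc entry =>
      let mv := parseRule entry
      if mv.2 == "" then acc
      else if mv.1 == "contains" then (acc.1, acc.2 ++ [mv.2])
      else (PySem.Set.add acc.1 mv.2, acc.2))
    (PySem.Set.empty, [])

def matches_company_rules_py_alt (company : String) (exclusions : List String) : Bool :=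
  let nc := normText company
  if nc == "" then false
  else
    let idx := buildIndex exclusions
    if idx.1.contains nc then true
    else idx.2.any (fun v => PySem.Str.isIn v nc)

-- ===== PRECONDITION & SPEC =====
def Spec_matches_company_rules_py (company : String) (exclusions : List String) (out : Bool) : Prop := out = matches_company_rules_py_alt company exclusions
instance (company : String) (exclusions : List String) (out : Bool) : Decidable (Spec_matches_company_rules_py company exclusions out) := by unfold Spec_matches_company_rules_py; infer_instance

-- ===== CLAIM (what is proved, stated in full; the proofs are below) =====
def Claim_equal_matches_company_rules_py : Prop := ∀ (company : String) (exclusions : List String), Dom_matches_company_rules_py company exclusions → Spec_matches_company_rules_py company exclusions (matches_company_rules_py company exclusions)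

-- ===== LEMMAS AND PROOFS =====
theorem set_contains_add (s : PySem.Set String) (x y : String) :
    (PySem.Set.add s x).contains y = (s.contains y || y == x) := by
  simp [PySem.Set.add, PySem.Set.contains]
  split_ifs with h
  · by_cases hyx : y = x <;> simp_all
  · by_cases hy : y ∈ s <;> by_cases hyx : y = x <;> simp_all

-- the fold-then-check of B agrees with A's early-exit loop, for any accumulator
theorem build_check_eq_loop (nc : String) (es : List String)
    (S : PySem.Set String) (L : List String) :
    ((es.foldl
        (fun acc entry =>
          let mv := parseRule entry
          if mv.2 == "" then acc
          else if mv.1 == "contains" then (acc.1, acc.2 ++ [mv.2])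
          else (PySem.Set.add acc.1 mv.2, acc.2)) (S, L)).1.contains nc ||
     (es.foldl
        (fun acc entry =>
          let mv := parseRule entry
          if mv.2 == "" then acc
          else if mv.1 == "contains" then (acc.1, acc.2 ++ [mv.2])
          else (PySem.Set.add acc.1 mv.2, acc.2)) (S, L)).2.any
        (fun v => PySem.Str.isIn v nc)) =
    (S.contains nc || L.any (fun v => PySem.Str.isIn v nc) || loopA nc es) := by
  induction es generalizing S L with
  | nil => simp [loopA]
  | cons e rest ih =>
    simp only [List.foldl_cons, loopA]
    by_cases h1 : ((parseRule e).2 == "") = true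
    · simp only [h1, if_true, ih]
    · simp only [h1, if_false, Bool.false_eq_true]
      by_cases h2 : ((parseRule e).1 == "contains") = true
      · simp only [h2, if_true, ih, List.any_append, List.any_cons, List.any_nil]
        cases hv : PySem.Str.isIn (parseRule e).2 nc <;>
          cases S.contains nc <;> cases L.any (fun v => PySem.Str.isIn v nc) <;> simp
      · simp only [h2, if_false, Bool.false_eq_true, ih, set_contains_add]
        by_cases h3 : (parseRule e).2 = nc
        · simp [h3]
        · have hx : ((parseRule e).2 == nc) = false := by simp [h3]
          have hy : (nc == (parseRule e).2) = false := by simp [Ne.symm h3]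
          simp [hx, hy]

-- ===== VERDICT (by name: the statement is the Claim_ definition above) =====
theorem matches_company_rules_py_spec : Claim_equal_matches_company_rules_py := by
  intro company exclusions _
  unfold Spec_matches_company_rules_py matches_company_rules_py matches_company_rules_py_alt buildIndex
  by_cases h : (normText company == "") = true
  · simp [h]
  · simp only [h, if_false, Bool.false_eq_true, Bool.if_true_left, Bool.decide_eq_true]
    rw [build_check_eq_loop]
    simp [PySem.Set.contains, PySem.Set.empty]
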